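-- pv_equiv track=rewrite | github.com/Stanford-ILIAD/droc | utils/string_utils.py | break_plan_into_steps
-- ===== SOURCE A (Python) =====
-- def break_plan_into_steps(code_as_policies):
--     if '# ' in code_as_policies:
--         lines = code_as_policies.strip().split('\n')
--         # Initialize variables to store each step's code
--         step_codes = []
--         current_step = []
--         # Iterate through the lines and identify each step's code
--         for line in lines:
--             if line.startswith("# "):
--                 if current_step:
--                     step_codes.append('\n'.join(current_step))
--                     current_step = []
--             current_step.append(line)
--         # Append the last step's code
--         if current_step:
--             step_codes.append('\n'.join(current_step))
--     else:
--         step_codes = [code_as_policies]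
--     return step_codes
-- ===== SOURCE B (Python) =====
-- # Recursive block decomposition: peel off one step (head line + following
-- # non-comment lines) at a time, instead of A's accumulator fold.
-- def _steps(lines):
--     if not lines:
--         return []
--     rest = lines[1:]
--     k = 0
--     while k < len(rest) and not rest[k].startswith('# '):
--         k += 1
--     return ['\n'.join([lines[0]] + rest[:k])] + _steps(rest[k:])
--
-- def break_plan_into_steps(code_as_policies):
--     if '# ' in code_as_policies:
--         return _steps(code_as_policies.strip().split('\n'))
--     else:
--         return [code_as_policies]
-- ===== Notes on version B (the rewrite author's own statement) =====
-- stated objective: alternative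
-- what changed: Replaces A's single fold with an accumulator of pending lines and flush-on-comment logic by a recursive decomposition that peels off one whole step (head line plus following non-comment lines) per call and joins it directly.
import Mathlib
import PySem

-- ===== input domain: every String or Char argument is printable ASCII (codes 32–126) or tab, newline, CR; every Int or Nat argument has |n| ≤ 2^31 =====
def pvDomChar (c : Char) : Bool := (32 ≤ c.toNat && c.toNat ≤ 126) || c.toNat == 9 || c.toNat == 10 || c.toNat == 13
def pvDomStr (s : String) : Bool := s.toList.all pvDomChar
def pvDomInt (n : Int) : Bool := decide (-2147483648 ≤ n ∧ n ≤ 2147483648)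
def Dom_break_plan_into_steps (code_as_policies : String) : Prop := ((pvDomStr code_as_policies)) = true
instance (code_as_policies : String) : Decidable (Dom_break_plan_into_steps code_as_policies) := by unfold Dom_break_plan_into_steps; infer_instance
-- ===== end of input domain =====

-- B replaces A's accumulator fold by a recursive block decomposition (peel one step at a time); objective: alternative, same cost.


-- shared helper: code_as_policies.strip().split('\n')  (Str.splitOn has no wrapper; exact via Chars.splitOn on code points)
def pvLines (s : String) : List String :=
  (PySem.Chars.splitOn (PySem.Str.strip s).toList ['\n']).map (fun cs => String.ofList cs)

-- ===== PORT A =====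
-- one iteration of A's loop body: maybe flush current_step, then append the line
def pvStepA (st : List String × List String) (line : String) : List String × List String :=
  let st :=
    if PySem.Str.startswith line "# " then
      if st.2 ≠ [] then (st.1 ++ [PySem.Str.join "\n" st.2], ([] : List String)) else st
    else st
  (st.1, st.2 ++ [line])

def break_plan_into_steps (code_as_policies : String) : List String :=
  if PySem.Str.isIn "# " code_as_policies then
    let st := (pvLines code_as_policies).foldl pvStepA ([], [])
    if st.2 ≠ [] then st.1 ++ [PySem.Str.join "\n" st.2] else st.1
  else [code_as_policies]

-- ===== PORT B =====
-- _steps: first line plus the following non-comment lines form one step; recurse on the rest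
def pvSteps : List String → List String
  | [] => []
  | l :: rest =>
      PySem.Str.join "\n" (l :: rest.takeWhile (fun x => !(PySem.Str.startswith x "# ")))
        :: pvSteps (rest.dropWhile (fun x => !(PySem.Str.startswith x "# ")))
termination_by lines => lines.length
decreasing_by
  exact Nat.lt_of_le_of_lt (List.length_dropWhile_le _ _) (by simp)

def break_plan_into_steps_alt (code_as_policies : String) : List String :=
  if PySem.Str.isIn "# " code_as_policies then
    pvSteps (pvLines code_as_policies)
  else [code_as_policies]

-- ===== PRECONDITION & SPEC =====
def Spec_break_plan_into_steps (code_as_policies : String) (out : List String) : Prop := out = break_plan_into_steps_alt code_as_policies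
instance (code_as_policies : String) (out : List String) : Decidable (Spec_break_plan_into_steps code_as_policies out) := by unfold Spec_break_plan_into_steps; infer_instance

-- ===== CLAIM (what is proved, stated in full; the proofs are below) =====
def Claim_equal_break_plan_into_steps : Prop := ∀ (code_as_policies : String), Dom_break_plan_into_steps code_as_policies → Spec_break_plan_into_steps code_as_policies (break_plan_into_steps code_as_policies)

-- ===== LEMMAS AND PROOFS =====

-- A's loop from a nonempty current_step produces sc, then the block completed by the
-- coming non-comment lines, then B's decomposition of the remainder.
theorem pvLoop_eq (lines : List String) : ∀ (sc cur : List String), cur ≠ [] →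
    (let st := lines.foldl pvStepA (sc, cur)
     if st.2 ≠ [] then st.1 ++ [PySem.Str.join "\n" st.2] else st.1)
    = sc ++ [PySem.Str.join "\n" (cur ++ lines.takeWhile (fun x => !(PySem.Str.startswith x "# ")))]
        ++ pvSteps (lines.dropWhile (fun x => !(PySem.Str.startswith x "# "))) := by
  induction lines with
  | nil =>
      intro sc cur hcur
      rw [pvSteps.eq_def]
      simp [hcur]
  | cons x xs ih =>
      intro sc cur hcur
      by_cases hb : PySem.Str.startswith x "# " = true
      · have hbC : PySem.Chars.startswith x.toList ['#', ' '] = true := by simpa using hb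
        have hstep : pvStepA (sc, cur) x = (sc ++ [PySem.Str.join "\n" cur], [x]) := by
          simp [pvStepA, hbC, hcur]
        simp only [List.foldl_cons, hstep]
        rw [ih (sc ++ [PySem.Str.join "\n" cur]) [x] (by simp)]
        rw [List.takeWhile_cons, List.dropWhile_cons]
        conv_rhs => rw [pvSteps.eq_def]
        simp [hbC]
      · have hb' : PySem.Chars.startswith x.toList ['#', ' '] = false := by
          simpa using hb
        have hstep : pvStepA (sc, cur) x = (sc, cur ++ [x]) := by
          simp [pvStepA, hb']
        simp only [List.foldl_cons, hstep]
        rw [ih sc (cur ++ [x]) (by simp)]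
        rw [List.takeWhile_cons, List.dropWhile_cons]
        simp [hb']

-- ===== VERDICT (by name: the statement is the Claim_ definition above) =====
theorem break_plan_into_steps_spec : Claim_equal_break_plan_into_steps := by
  unfold Claim_equal_break_plan_into_steps
  intro s _
  unfold Spec_break_plan_into_steps break_plan_into_steps break_plan_into_steps_alt
  by_cases hin : PySem.Str.isIn "# " s = true
  · rw [if_pos hin, if_pos hin]
    cases hl : pvLines s with
    | nil => rw [pvSteps.eq_def]; simp
    | cons l rest =>
        have hstep0 : pvStepA ([], []) l = ([], [l]) := by
          simp [pvStepA]
        simp only [List.foldl_cons, hstep0]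
        rw [pvLoop_eq rest [] [l] (by simp)]
        conv_rhs => rw [pvSteps.eq_def]
        simp
  · rw [if_neg hin, if_neg hin]
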